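-- pv_equiv track=rewrite | github.com/santorini19970530/data_structures_and_algorithms | Data_Structures/016_queues/queues.py | qFunc
-- ===== SOURCE A (Python) =====
-- class Queue:
--     def __init__(self):
--         # private
--         self.__q = []
--
--     def getLength(self):
--         return len(self.__q)
--
--     def head(self):
--         if not(self.isEmpty()):
--             return self.__q[-1]
--         return "nothing in the queue"
--
--     def isEmpty(self):
--         return self.getLength() == 0
--
--     def enqueue(self, num):
--         self.__q.insert(0, num);
--
--     def dequeue(self):
--         if not(self.isEmpty()):
--             self.__q.pop(-1)
--         else:
--             return "nothin in the queue"
--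
-- def qFunc(n):
--     que = Queue()
--
--     for i in range(n):
--         que.enqueue((i+1) % 2)
--
--     x = 0
--
--     while not que.isEmpty():
--         x += que.head()
--         que.dequeue();
--
--     return x
-- ===== SOURCE B (Python) =====
-- def qFunc(n):
--     # Closed form: the loop sums (i+1) % 2 for i in range(n), i.e. counts even i,
--     # which is (n+1)//2 for positive n and 0 otherwise.
--     return (n + 1) // 2 if n > 0 else 0
-- ===== Notes on version B (the rewrite author's own statement) =====
-- stated objective: faster
-- what changed: Replaced the queue build-up and drain loops with the closed form (n+1)//2 (count of even indices below n).
import Mathlib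
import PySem

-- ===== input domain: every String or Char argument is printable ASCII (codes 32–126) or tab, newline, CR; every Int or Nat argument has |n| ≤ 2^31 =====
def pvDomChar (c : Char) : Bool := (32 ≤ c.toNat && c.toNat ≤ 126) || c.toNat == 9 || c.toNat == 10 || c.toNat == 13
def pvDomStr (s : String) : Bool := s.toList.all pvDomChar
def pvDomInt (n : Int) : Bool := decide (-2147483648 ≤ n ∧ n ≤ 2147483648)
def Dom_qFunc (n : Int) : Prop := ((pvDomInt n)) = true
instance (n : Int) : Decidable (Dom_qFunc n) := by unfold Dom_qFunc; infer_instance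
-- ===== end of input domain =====

-- B replaces A's queue build-up and drain loops with the closed form (n+1)//2; return value only.

-- ===== PORT A =====
-- the while loop: x += que.head() (last element); que.dequeue() (pop last)
def qDrain : List Int → Int → Int
  | [], x => x
  | (a :: q), x => qDrain (a :: q).dropLast (x + (a :: q).getLastD 0)  -- q[-1]; list nonempty here
termination_by q _ => q.length
decreasing_by simp [List.length_dropLast]

def qFunc (n : Int) : Int :=
  -- for i in range(n): que.enqueue((i+1) % 2)  — enqueue inserts at index 0
  let q : List Int := (PySem.List.pyRange 0 n 1).foldl (fun q i => PySem.Int.mod (i + 1) 2 :: q) []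
  qDrain q 0

-- ===== PORT B =====
def qFunc_alt (n : Int) : Int :=
  if n > 0 then PySem.Int.floordiv (n + 1) 2 else 0

-- ===== PRECONDITION & SPEC =====
def Spec_qFunc (n : Int) (out : Int) : Prop := out = qFunc_alt n
instance (n : Int) (out : Int) : Decidable (Spec_qFunc n out) := by unfold Spec_qFunc; infer_instance

-- ===== CLAIM (what is proved, stated in full; the proofs are below) =====
def Claim_equal_qFunc : Prop := ∀ (n : Int), Dom_qFunc n → Spec_qFunc n (qFunc n)

-- ===== LEMMAS AND PROOFS =====

theorem qDrain_append (q : List Int) (a x : Int) :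
    qDrain (q ++ [a]) x = qDrain q (x + a) := by
  cases q with
  | nil => simp [qDrain]
  | cons b t =>
    rw [show (b :: t) ++ [a] = b :: (t ++ [a]) from rfl, qDrain,
      show b :: (t ++ [a]) = (b :: t) ++ [a] from rfl, List.dropLast_concat]
    have h2 : (b :: (t ++ [a])).getLast? = some a := by
      rw [← List.cons_append]; exact List.getLast?_concat
    simp [h2]

theorem qDrain_sum (q : List Int) (x : Int) : qDrain q x = x + q.sum := by
  induction q using List.reverseRecOn generalizing x with
  | nil => simp [qDrain]
  | append_singleton t a ih => rw [qDrain_append, ih]; simp; ring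

theorem foldl_cons_build (l : List Int) (f : Int → Int) (acc : List Int) :
    l.foldl (fun q i => f i :: q) acc = (l.map f).reverse ++ acc := by
  induction l generalizing acc with
  | nil => simp
  | cons b t ih => simp [List.foldl, ih]

theorem sum_mod_range (m : Nat) :
    ((List.range m).map (fun k : Nat => ((k : Int) + 1) % 2)).sum = ((m : Int) + 1) / 2 := by
  induction m with
  | zero => simp
  | succ m ih =>
    rw [List.range_succ, List.map_append, List.sum_append, ih]
    push_cast
    simp
    omega

-- ===== VERDICT (by name: the statement is the Claim_ definition above) =====
theorem qFunc_spec : Claim_equal_qFunc := by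
  intro n _
  show qFunc n = qFunc_alt n
  unfold qFunc qFunc_alt
  rw [foldl_cons_build, qDrain_sum]
  simp [PySem.List.pyRange_one]
  by_cases h : n > 0
  · rw [if_pos h,
      show ((fun i : Int => (i + 1) % 2) ∘ fun k : Nat => (k : Int))
         = (fun k : Nat => ((k : Int) + 1) % 2) from rfl,
      sum_mod_range, Int.toNat_of_nonneg (by omega)]
  · rw [if_neg h]
    have : n.toNat = 0 := by omega
    simp [this]
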